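-- pv_equiv track=rewrite | github.com/SteeZyT33/spec-kit-orchestration | src/speckit_orca/flow_state.py | _has_material_conflict
-- ===== SOURCE A (Python) =====
-- def _has_material_conflict(
--     ambiguities: list[str], filenames: dict[str, str]
-- ) -> bool:
--     review_code_name = filenames["review_code"]
--     tasks_name = filenames["tasks"]
--     conflict_markers = (
--         "without specification evidence",
--         "without planning evidence",
--         "without task breakdown evidence",
--         f"{review_code_name} exists without {tasks_name}",
--     )
--     return any(any(marker in ambiguity for marker in conflict_markers) for ambiguity in ambiguities)
-- ===== SOURCE B (Python) =====
-- def _has_material_conflict(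
--     ambiguities: list[str], filenames: dict[str, str]
-- ) -> bool:
--     review_code_name = filenames["review_code"]
--     tasks_name = filenames["tasks"]
--     # Join all ambiguities with NUL (never present in the texts): one substring
--     # scan per marker over the combined text, written as a flat or-chain with
--     # no loops or marker tuple at all.
--     joined = "\x00".join(ambiguities)
--     return (
--         "without specification evidence" in joined
--         or "without planning evidence" in joined
--         or "without task breakdown evidence" in joined
--         or f"{review_code_name} exists without {tasks_name}" in joined
--     )
-- ===== Notes on version B (the rewrite author's own statement) =====
-- stated objective: alternative
-- what changed: Instead of A's nested any() loops scanning every marker against every ambiguity, B joins all ambiguities into one text with a NUL separator (absent from the texts) and tests the four markers with a flat loop-free or-chain of substring checks over that single combined string.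
import Mathlib
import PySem

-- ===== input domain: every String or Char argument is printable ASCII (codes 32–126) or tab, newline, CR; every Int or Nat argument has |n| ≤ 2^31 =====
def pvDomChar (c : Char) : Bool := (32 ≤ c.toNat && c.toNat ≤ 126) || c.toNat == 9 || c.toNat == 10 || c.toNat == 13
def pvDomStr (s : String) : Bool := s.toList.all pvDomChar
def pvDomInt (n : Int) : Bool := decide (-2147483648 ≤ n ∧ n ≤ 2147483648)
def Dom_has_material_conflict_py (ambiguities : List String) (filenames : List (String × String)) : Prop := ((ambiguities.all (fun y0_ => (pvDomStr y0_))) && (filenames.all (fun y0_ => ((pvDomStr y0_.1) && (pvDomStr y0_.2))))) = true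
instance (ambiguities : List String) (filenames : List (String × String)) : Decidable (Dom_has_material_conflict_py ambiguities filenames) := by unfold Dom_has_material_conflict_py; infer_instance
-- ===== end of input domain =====

-- B joins all ambiguities with a NUL separator (absent from the printable-ASCII texts) and tests the
-- four markers with a flat loop-free or-chain over that one combined string, instead of A's nested
-- any-loops over markers x ambiguities; equivalence proved on the printable-ASCII domain.

-- ===== PORT A =====
def has_material_conflict_py (ambiguities : List String) (filenames : List (String × String)) : Bool :=
  match (PySem.Dict.mk filenames).get? "review_code", (PySem.Dict.mk filenames).get? "tasks" with
  | some review_code_name, some tasks_name =>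
    let conflict_markers : List String :=
      [ "without specification evidence",
        "without planning evidence",
        "without task breakdown evidence",
        PySem.Str.join "" [review_code_name, " exists without ", tasks_name] ]
    ambiguities.any (fun ambiguity => conflict_markers.any (fun marker => PySem.Str.isIn marker ambiguity))
  | _, _ => false  -- Python raises KeyError here; excluded by Pre_

-- ===== PORT B =====
def has_material_conflict_py_alt (ambiguities : List String) (filenames : List (String × String)) : Bool :=
  -- the two lookups (Python raises KeyError on a missing key; excluded by Pre_, default false unused there)
  (((PySem.Dict.mk filenames).get? "review_code").bind fun review_code_name =>
    ((PySem.Dict.mk filenames).get? "tasks").map fun tasks_name =>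
      let joined := PySem.Str.join "\x00" ambiguities
      PySem.Str.isIn "without specification evidence" joined
      || PySem.Str.isIn "without planning evidence" joined
      || PySem.Str.isIn "without task breakdown evidence" joined
      || PySem.Str.isIn (PySem.Str.join "" [review_code_name, " exists without ", tasks_name]) joined
  ).getD false

-- ===== PRECONDITION & SPEC =====
-- Pre_ excludes exactly the inputs where the dict lacks a "review_code" or "tasks" key, on which A raises KeyError.
def Pre_has_material_conflict_py (ambiguities : List String) (filenames : List (String × String)) : Prop :=
  ((PySem.Dict.mk filenames).get? "review_code").isSome = true ∧ ((PySem.Dict.mk filenames).get? "tasks").isSome = true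
instance (ambiguities : List String) (filenames : List (String × String)) : Decidable (Pre_has_material_conflict_py ambiguities filenames) := by unfold Pre_has_material_conflict_py; infer_instance
def pvWitness_has_material_conflict_py : List String × (List (String × String)) :=
  (["code.md exists without tasks.md"], [("review_code", "code.md"), ("tasks", "tasks.md")])

def Spec_has_material_conflict_py (ambiguities : List String) (filenames : List (String × String)) (out : Bool) : Prop := out = has_material_conflict_py_alt ambiguities filenames
instance (ambiguities : List String) (filenames : List (String × String)) (out : Bool) : Decidable (Spec_has_material_conflict_py ambiguities filenames out) := by unfold Spec_has_material_conflict_py; infer_instance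

-- ===== CLAIM (what is proved, stated in full; the proofs are below) =====
def Claim_equal_has_material_conflict_py : Prop := ∀ (ambiguities : List String) (filenames : List (String × String)), Dom_has_material_conflict_py ambiguities filenames → Pre_has_material_conflict_py ambiguities filenames → Spec_has_material_conflict_py ambiguities filenames (has_material_conflict_py ambiguities filenames)

-- ===== LEMMAS AND PROOFS =====

-- a prefix that avoids the separator character stays inside the left block
lemma prefix_of_avoid (a : Char) (cs : List Char) (ha : a ∉ cs) :
    ∀ l₁ l₂ : List Char, cs <+: l₁ ++ a :: l₂ → cs <+: l₁ := by
  induction cs with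
  | nil => intro l₁ l₂ _; exact List.nil_prefix
  | cons c cs ih =>
    intro l₁ l₂ h
    cases l₁ with
    | nil =>
      obtain ⟨t, ht⟩ := h
      simp at ht
      exact absurd (ht.1 ▸ List.mem_cons_self) ha
    | cons b l₁' =>
      obtain ⟨t, ht⟩ := h
      simp at ht
      obtain ⟨hb, ht'⟩ := ht
      have : cs <+: l₁' ++ a :: l₂ := ⟨t, ht'⟩
      obtain ⟨u, hu⟩ := ih (fun hm => ha (List.mem_cons_of_mem _ hm)) l₁' l₂ this
      exact ⟨u, by simp [hb, hu]⟩

-- an infix avoiding the separator lies wholly left or wholly right of it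
lemma infix_split (a : Char) (cs : List Char) (ha : a ∉ cs) :
    ∀ l₁ l₂ : List Char, cs <:+: l₁ ++ a :: l₂ → cs <:+: l₁ ∨ cs <:+: l₂ := by
  intro l₁
  induction l₁ with
  | nil =>
    intro l₂ h
    simp only [List.nil_append, List.infix_cons_iff] at h
    cases h with
    | inl hp =>
      cases cs with
      | nil => exact Or.inl List.nil_infix
      | cons c cs' =>
        obtain ⟨t, ht⟩ := hp
        simp at ht
        exact absurd (ht.1 ▸ List.mem_cons_self) ha
    | inr hi => exact Or.inr hi
  | cons b l₁' ih =>
    intro l₂ h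
    simp only [List.cons_append, List.infix_cons_iff] at h
    cases h with
    | inl hp =>
      have : cs <+: (b :: l₁') := prefix_of_avoid a cs ha (b :: l₁') l₂ (by simpa using hp)
      exact Or.inl this.isInfix
    | inr hi =>
      cases ih l₂ hi with
      | inl h' => exact Or.inl (h'.trans (List.suffix_cons b l₁').isInfix)
      | inr h' => exact Or.inr h'

-- substring of the NUL-join ↔ substring of one of the pieces
lemma infix_join_iff (a : Char) (cs : List Char) (ha : a ∉ cs) (hne : cs ≠ []) :
    ∀ pieces : List (List Char), (cs <:+: PySem.Chars.join [a] pieces ↔ ∃ p ∈ pieces, cs <:+: p) := by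
  intro pieces
  induction pieces with
  | nil =>
    rw [PySem.Chars.join_nil]
    simp [List.infix_nil, hne]
  | cons p rest ih =>
    cases rest with
    | nil =>
      rw [PySem.Chars.join_singleton]
      simp
    | cons q rest' =>
      rw [PySem.Chars.join_cons_cons]
      constructor
      · intro h
        have h' : cs <:+: p ++ a :: PySem.Chars.join [a] (q :: rest') := by
          simpa [List.append_assoc] using h
        cases infix_split a cs ha p _ h' with
        | inl hp => exact ⟨p, List.mem_cons_self, hp⟩
        | inr hr =>
          obtain ⟨x, hx, hcs⟩ := ih.mp hr
          exact ⟨x, List.mem_cons_of_mem _ hx, hcs⟩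
      · rintro ⟨x, hx, hcs⟩
        rcases List.mem_cons.mp hx with rfl | hx'
        · refine hcs.trans ?_
          rw [List.append_assoc]
          exact (List.prefix_append _ _).isInfix
        · have : cs <:+: PySem.Chars.join [a] (q :: rest') := ih.mpr ⟨x, hx', hcs⟩
          have hsfx : PySem.Chars.join [a] (q :: rest') <:+ p ++ [a] ++ PySem.Chars.join [a] (q :: rest') :=
            List.suffix_append _ _
          exact this.trans hsfx.isInfix

-- a value returned by the first-match lookup is a value stored in the list
lemma get?_mem {l : List (String × String)} {k v : String}
    (h : (PySem.Dict.mk l).get? k = some v) : (k, v) ∈ l := by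
  induction l with
  | nil => simp [PySem.Dict.get?] at h
  | cons kv rest ih =>
    obtain ⟨k', v'⟩ := kv
    rw [PySem.Dict.get?_mk_cons] at h
    by_cases hk : (k' == k) = true
    · have hk' : k' = k := by simpa using hk
      have hv : v' = v := by simpa [hk] using h
      subst hk'; subst hv; exact List.mem_cons_self
    · simp [hk] at h
      exact List.mem_cons_of_mem _ (ih h)

-- Dom strings never contain NUL
lemma nul_not_mem_of_dom {s : String} (h : pvDomStr s = true) : '\x00' ∉ s.toList := by
  intro hm
  have := List.all_eq_true.mp h _ hm
  simp [pvDomChar] at this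

-- ===== VERDICT (by name: the statement is the Claim_ definition above) =====
theorem has_material_conflict_py_spec : Claim_equal_has_material_conflict_py := by
  intro ambiguities filenames hdom hpre
  unfold Spec_has_material_conflict_py
  obtain ⟨h1, h2⟩ := hpre
  obtain ⟨rc, hrc⟩ := Option.isSome_iff_exists.mp h1
  obtain ⟨tn, htn⟩ := Option.isSome_iff_exists.mp h2
  unfold has_material_conflict_py has_material_conflict_py_alt
  rw [hrc, htn]
  simp only [Option.bind_some, Option.map_some, Option.getD_some]
  -- Dom facts about the fourth marker's components
  unfold Dom_has_material_conflict_py at hdom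
  simp only [Bool.and_eq_true, List.all_eq_true] at hdom
  obtain ⟨hamb, hfn⟩ := hdom
  have hrcdom : pvDomStr rc = true := (hfn _ (get?_mem hrc)).2
  have htndom : pvDomStr tn = true := (hfn _ (get?_mem htn)).2
  -- each marker: no NUL, nonempty
  have hmark : ∀ m ∈ [ "without specification evidence", "without planning evidence",
      "without task breakdown evidence", PySem.Str.join "" [rc, " exists without ", tn] ],
      ('\x00' ∉ m.toList ∧ m.toList ≠ []) := by
    intro m hm
    simp only [List.mem_cons, List.not_mem_nil, or_false] at hm
    rcases hm with rfl | rfl | rfl | rfl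
    · exact ⟨by decide, by decide⟩
    · exact ⟨by decide, by decide⟩
    · exact ⟨by decide, by decide⟩
    · constructor
      · intro hm
        rw [PySem.Str.toList_join] at hm
        simp [PySem.Chars.join_cons_cons, PySem.Chars.join_singleton,
          nul_not_mem_of_dom hrcdom, nul_not_mem_of_dom htndom] at hm
      · intro hm
        rw [PySem.Str.toList_join] at hm
        simp only [List.map, PySem.Chars.join_cons_cons, PySem.Chars.join_singleton] at hm
        have := congrArg List.length hm
        simp at this
  -- fold B's or-chain into an 'any' over the marker list, then bridge via the join characterisation
  rw [show ∀ j : String,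
      (PySem.Str.isIn "without specification evidence" j
       || PySem.Str.isIn "without planning evidence" j
       || PySem.Str.isIn "without task breakdown evidence" j
       || PySem.Str.isIn (PySem.Str.join "" [rc, " exists without ", tn]) j)
      = [ "without specification evidence", "without planning evidence",
          "without task breakdown evidence", PySem.Str.join "" [rc, " exists without ", tn]
        ].any (fun marker => PySem.Str.isIn marker j)
    from fun j => by simp [List.any, Bool.or_assoc]]
  rw [Bool.eq_iff_iff]
  simp only [List.any_eq_true, PySem.Str.isIn_iff_infix]
  constructor
  · rintro ⟨amb, hamb', m, hm, hinf⟩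
    refine ⟨m, hm, ?_⟩
    obtain ⟨hnul, hne⟩ := hmark m hm
    rw [PySem.Str.toList_join]
    exact (infix_join_iff '\x00' m.toList hnul hne (ambiguities.map String.toList)).mpr
      ⟨amb.toList, List.mem_map_of_mem hamb', hinf⟩
  · rintro ⟨m, hm, hinf⟩
    obtain ⟨hnul, hne⟩ := hmark m hm
    rw [PySem.Str.toList_join] at hinf
    obtain ⟨p, hp, hinf'⟩ :=
      (infix_join_iff '\x00' m.toList hnul hne (ambiguities.map String.toList)).mp
      (by simpa using hinf)
    obtain ⟨amb, hamb', rfl⟩ := List.mem_map.mp hp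
    exact ⟨amb, hamb', m, hm, hinf'⟩
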